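-- pv_equiv track=rewrite | github.com/sadman15019/CSE-3200-final | app/src/main/python/New/Glucose/scripts/generate_dataset.py | sort_descending_order
-- ===== SOURCE A (Python) =====
-- def sort_descending_order(lst):
--     '''
--         * Use to sort descending order of PPG wave
--         arg:
--             lst = list
--     '''
--     ranks = sorted( [(x,i) for (i,x) in enumerate(lst)], reverse=True )
--     values = []
--     posns = []
--     for x,i in ranks:
--         if x not in values:
--             values.append( x )
--             posns.append( i )
--
--     return values, posns
-- ===== SOURCE B (Python) =====
-- def sort_descending_order(lst):
--     '''
--         * Use to sort descending order of PPG wave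
--         arg:
--             lst = list
--     '''
--     d = {}
--     for i, x in enumerate(lst):
--         d[x] = i
--     values = sorted(d, reverse=True)
--     posns = [d[v] for v in values]
--     return values, posns
-- ===== Notes on version B (the rewrite author's own statement) =====
-- stated objective: faster
-- what changed: Replaces sorting all n (value,index) pairs and deduplicating with a linear 'x not in values' scan per pair by a single dict pass keeping the max index per value, then sorting only the distinct keys descending and reading positions from the table.
import Mathlib
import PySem

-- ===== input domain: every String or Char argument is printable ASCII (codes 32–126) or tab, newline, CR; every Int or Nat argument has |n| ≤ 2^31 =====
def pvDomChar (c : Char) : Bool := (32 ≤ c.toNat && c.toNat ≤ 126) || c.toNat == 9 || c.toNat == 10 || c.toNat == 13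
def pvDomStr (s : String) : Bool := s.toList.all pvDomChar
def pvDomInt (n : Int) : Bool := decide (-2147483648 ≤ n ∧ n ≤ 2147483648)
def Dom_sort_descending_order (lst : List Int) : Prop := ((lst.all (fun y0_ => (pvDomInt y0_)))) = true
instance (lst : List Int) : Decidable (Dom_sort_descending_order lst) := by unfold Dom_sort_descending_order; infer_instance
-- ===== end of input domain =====

-- B replaces sort-all-pairs + dedup-by-linear-scan with one dict pass keeping the max
-- index per value, then sorts only the distinct keys (objective: faster; measured by the check).

-- ===== PORT A =====
-- ranks = sorted([(x,i) for (i,x) in enumerate(lst)], reverse=True); then keep first of each value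
def sort_descending_order (lst : List Int) : List Int × List Int :=
  let ranks := PySem.List.sorted2
      ((PySem.List.enumerate lst).map (fun p => (p.2, p.1))) (fun p => p.1) (fun p => p.2) true
  ranks.foldl
    (fun (acc : List Int × List Int) p =>
      if p.1 ∈ acc.1 then acc else (acc.1 ++ [p.1], acc.2 ++ [p.2]))
    ([], [])

-- ===== PORT B =====
-- d[x] = i for i,x in enumerate(lst); values = sorted(d, reverse=True); posns = [d[v] for v in values]
def sort_descending_order_alt (lst : List Int) : List Int × List Int :=
  let d := (PySem.List.enumerate lst).foldl (fun d p => d.insert p.2 p.1)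
             (PySem.Dict.empty : PySem.Dict Int Int)
  let values := PySem.List.sorted d.keys (fun x => x) true
  -- d[v]: every v comes from d's keys, so the KeyError branch is unreachable; default 0 is never read
  let posns := values.map (fun v => d.getD v 0)
  (values, posns)

-- ===== PRECONDITION & SPEC =====
def Spec_sort_descending_order (lst : List Int) (out : List Int × List Int) : Prop := out = sort_descending_order_alt lst
instance (lst : List Int) (out : List Int × List Int) : Decidable (Spec_sort_descending_order lst out) := by unfold Spec_sort_descending_order; infer_instance

-- ===== CLAIM (what is proved, stated in full; the proofs are below) =====
def Claim_equal_sort_descending_order : Prop := ∀ (lst : List Int), Dom_sort_descending_order lst → Spec_sort_descending_order lst (sort_descending_order lst)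

-- ===== LEMMAS AND PROOFS =====

-- the strict lex order sorted2 uses on (value, index) pairs
def pvLex (a b : Int × Int) : Bool :=
  decide (a.1 < b.1) || (!decide (b.1 < a.1) && decide (a.2 < b.2))

-- "a is lex-≥ b": what holds between an earlier and a later element of the descending sort
def pvGe (a b : Int × Int) : Prop := b.1 < a.1 ∨ (b.1 = a.1 ∧ b.2 ≤ a.2)

lemma pvLex_false_iff (a b : Int × Int) : pvLex a b = false ↔ pvGe a b := by
  simp [pvLex, pvGe]; omega

-- take the first (value, index) pair of each value group of a lex-descending list
def ddf : List (Int × Int) → List Int × List Int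
  | [] => ([], [])
  | (x, i) :: rs =>
    let r := ddf (rs.dropWhile (fun p => decide (p.1 = x)))
    (x :: r.1, i :: r.2)
termination_by rs => rs.length
decreasing_by
  simpa using Nat.lt_succ_of_le (List.length_dropWhile_le _ _)

lemma insertBy_pairwise (bf : Int × Int → Int × Int → Bool)
    (hirr : ∀ a, bf a a = false)
    (htr : ∀ a b c, bf a b = true → bf b c = true → bf a c = true)
    (x : Int × Int) (acc : List (Int × Int))
    (h : acc.Pairwise (fun a b => bf b a = false)) :
    (PySem.List.insertBy bf x acc).Pairwise (fun a b => bf b a = false) := by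
  induction acc with
  | nil => simp [PySem.List.insertBy]
  | cons y ys ih =>
    rcases List.pairwise_cons.mp h with ⟨hy, hys⟩
    by_cases hxy : bf x y = true
    · simp only [PySem.List.insertBy, hxy, if_pos]
      refine List.pairwise_cons.mpr ⟨?_, h⟩
      intro z hz
      rcases List.mem_cons.mp hz with rfl | hz
      · by_contra hyx
        have := htr z x z (by simpa using hyx) hxy
        simp [hirr] at this
      · by_contra hzx
        have hzy := htr z x y (by simpa using hzx) hxy
        have := hy z hz
        simp [this] at hzy
    · simp only [PySem.List.insertBy, hxy, if_neg, Bool.false_eq_true, not_false_iff]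
      refine List.pairwise_cons.mpr ⟨?_, ih hys⟩
      intro z hz
      rcases (PySem.List.mem_insertBy _ _ _ _).mp hz with rfl | hz
      · simpa using hxy
      · exact hy z hz

lemma foldl_insertBy_pairwise (bf : Int × Int → Int × Int → Bool)
    (hirr : ∀ a, bf a a = false)
    (htr : ∀ a b c, bf a b = true → bf b c = true → bf a c = true)
    (xs acc : List (Int × Int))
    (h : acc.Pairwise (fun a b => bf b a = false)) :
    (xs.foldl (fun acc x => PySem.List.insertBy bf x acc) acc).Pairwise
      (fun a b => bf b a = false) := by
  induction xs generalizing acc with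
  | nil => exact h
  | cons x xs ih => exact ih _ (insertBy_pairwise bf hirr htr x acc h)

lemma pvLex_irrefl (a : Int × Int) : pvLex a a = false := by simp [pvLex]

lemma pvLex_trans (a b c : Int × Int) :
    pvLex a b = true → pvLex b c = true → pvLex a c = true := by
  simp [pvLex]; omega

-- the descending sort of A is pairwise pvGe
lemma ranks_pairwise (xs : List (Int × Int)) :
    (PySem.List.sorted2 xs (fun p => p.1) (fun p => p.2) true).Pairwise pvGe := by
  have h := foldl_insertBy_pairwise (fun a b => pvLex b a)
      (fun a => pvLex_irrefl a)
      (fun a b c hab hbc => pvLex_trans c b a hbc hab)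
      xs [] (by simp)
  have : PySem.List.sorted2 xs (fun p => p.1) (fun p => p.2) true
      = xs.foldl (fun acc x => PySem.List.insertBy (fun a b => pvLex b a) x acc) [] := by
    simp only [PySem.List.sorted2, pvLex]
    rfl
  rw [this]
  exact h.imp (fun hab => (pvLex_false_iff _ _).mp hab)

-- A's dedup loop leaves the accumulator unchanged on a group already recorded
lemma foldl_absorb (g : List (Int × Int)) (acc : List Int × List Int)
    (h : ∀ p ∈ g, p.1 ∈ acc.1) :
    g.foldl (fun (acc : List Int × List Int) p =>
      if p.1 ∈ acc.1 then acc else (acc.1 ++ [p.1], acc.2 ++ [p.2])) acc = acc := by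
  induction g with
  | nil => rfl
  | cons p g ih =>
    have hp : p.1 ∈ acc.1 := h p (List.mem_cons_self ..)
    simp only [List.foldl_cons, if_pos hp]
    exact ih (fun q hq => h q (List.mem_cons_of_mem _ hq))

-- after dropping the x-group, every remaining first component is < x
lemma dropWhile_fst_lt (x : Int) (rs : List (Int × Int))
    (hpw : rs.Pairwise pvGe) (hle : ∀ p ∈ rs, p.1 ≤ x) :
    ∀ p ∈ rs.dropWhile (fun p => decide (p.1 = x)), p.1 < x := by
  have hsub : (rs.dropWhile (fun p => decide (p.1 = x))).Sublist rs :=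
    List.dropWhile_sublist _
  cases hd : rs.dropWhile (fun p => decide (p.1 = x)) with
  | nil => intro p hp; simp at hp
  | cons h t =>
    have hh_ne : ¬ (h.1 = x) := by
      have := List.head?_dropWhile_not (fun p => decide (p.1 = x)) rs
      rw [hd] at this; simpa using this
    have hh_mem : h ∈ rs := hsub.subset (hd ▸ List.mem_cons_self ..)
    have hh_lt : h.1 < x := lt_of_le_of_ne (hle h hh_mem) hh_ne
    have hpw' : (h :: t).Pairwise pvGe := hd ▸ hpw.sublist hsub
    intro p hp
    rcases List.mem_cons.mp hp with rfl | hp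
    · exact hh_lt
    · have := (List.pairwise_cons.mp hpw').1 p hp
      rcases this with h1 | ⟨h1, _⟩ <;> omega

-- A's fold over a lex-descending list is ddf, modulo the accumulator
lemma foldl_eq_ddf : ∀ (n : Nat) (rs : List (Int × Int)), rs.length ≤ n →
    rs.Pairwise pvGe → ∀ (vs ps : List Int), (∀ p ∈ rs, p.1 ∉ vs) →
    rs.foldl (fun (acc : List Int × List Int) p =>
        if p.1 ∈ acc.1 then acc else (acc.1 ++ [p.1], acc.2 ++ [p.2])) (vs, ps)
      = (vs ++ (ddf rs).1, ps ++ (ddf rs).2) := by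
  intro n
  induction n with
  | zero =>
    intro rs hlen _ vs ps _
    have : rs = [] := List.eq_nil_of_length_eq_zero (Nat.le_zero.mp hlen)
    subst this; simp [ddf]
  | succ n ih =>
    intro rs hlen hpw vs ps hnot
    match rs with
    | [] => simp [ddf]
    | (x, i) :: rest =>
      rcases List.pairwise_cons.mp hpw with ⟨hx, hrest⟩
      have hxin : x ∉ vs := hnot (x, i) (List.mem_cons_self ..)
      simp only [List.foldl_cons, if_neg hxin]
      have hsplit := List.takeWhile_append_dropWhile
        (p := fun p : Int × Int => decide (p.1 = x)) (l := rest)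
      set g := rest.takeWhile (fun p : Int × Int => decide (p.1 = x)) with hg
      set rest' := rest.dropWhile (fun p : Int × Int => decide (p.1 = x)) with hrest'
      have hfold : rest.foldl (fun (acc : List Int × List Int) p =>
          if p.1 ∈ acc.1 then acc else (acc.1 ++ [p.1], acc.2 ++ [p.2]))
          (vs ++ [x], ps ++ [i])
          = rest'.foldl (fun (acc : List Int × List Int) p =>
              if p.1 ∈ acc.1 then acc else (acc.1 ++ [p.1], acc.2 ++ [p.2]))
              (vs ++ [x], ps ++ [i]) := by
        conv_lhs => rw [← hsplit]
        rw [List.foldl_append]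
        congr 1
        apply foldl_absorb
        intro p hp
        have : p.1 = x := by simpa using List.mem_takeWhile_imp hp
        simp [this]
      rw [hfold]
      have hle : ∀ p ∈ rest, p.1 ≤ x := by
        intro p hp; rcases hx p hp with h1 | ⟨h1, _⟩ <;> omega
      have hlt : ∀ p ∈ rest', p.1 < x := dropWhile_fst_lt x rest hrest hle
      have hsub : rest'.Sublist rest := List.dropWhile_sublist _
      have hlen' : rest'.length ≤ rest.length := by
        rw [hrest']; exact List.length_dropWhile_le _ _
      have := ih rest' (by simp only [List.length_cons] at hlen; omega)
        (hrest.sublist hsub) (vs ++ [x]) (ps ++ [i]) (by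
          intro p hp
          simp only [List.mem_append, List.mem_singleton]
          push Not
          exact ⟨hnot p (List.mem_cons_of_mem _ (hsub.subset hp)),
            by have := hlt p hp; omega⟩)
      rw [this]
      rw [ddf, ← hrest']
      simp

lemma ddf_fst_mem_of (rs : List (Int × Int)) :
    ∀ v ∈ (ddf rs).1, ∃ p ∈ rs, p.1 = v := by
  induction rs using ddf.induct with
  | case1 => simp [ddf]
  | case2 x i rest ih =>
    intro v hv
    rw [ddf] at hv
    rcases List.mem_cons.mp hv with rfl | hv
    · exact ⟨(v, i), List.mem_cons_self .., rfl⟩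
    · obtain ⟨p, hp, hpv⟩ := ih v hv
      exact ⟨p, List.mem_cons_of_mem _ ((List.dropWhile_sublist _).subset hp), hpv⟩

lemma ddf_fst_mem (rs : List (Int × Int)) (hpw : rs.Pairwise pvGe) :
    ∀ p ∈ rs, p.1 ∈ (ddf rs).1 := by
  induction rs using ddf.induct with
  | case1 => simp
  | case2 x i rest ih =>
    rcases List.pairwise_cons.mp hpw with ⟨hx, hrest⟩
    intro p hp
    rw [ddf]
    rcases List.mem_cons.mp hp with rfl | hp
    · exact List.mem_cons_self ..
    · by_cases hpx : p.1 = x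
      · simp [hpx]
      · have : p ∈ rest.dropWhile (fun p => decide (p.1 = x)) := by
          have hsplit := List.takeWhile_append_dropWhile
            (p := fun p : Int × Int => decide (p.1 = x)) (l := rest)
          rw [← hsplit] at hp
          rcases List.mem_append.mp hp with h | h
          · exact absurd (by simpa using List.mem_takeWhile_imp h) hpx
          · exact h
        exact List.mem_cons_of_mem _
          (ih (hrest.sublist (List.dropWhile_sublist _)) p this)

lemma ddf_fst_pairwise (rs : List (Int × Int)) (hpw : rs.Pairwise pvGe) :
    (ddf rs).1.Pairwise (fun a b => b < a) := by
  induction rs using ddf.induct with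
  | case1 => simp [ddf]
  | case2 x i rest ih =>
    rcases List.pairwise_cons.mp hpw with ⟨hx, hrest⟩
    have hle : ∀ p ∈ rest, p.1 ≤ x := by
      intro p hp; rcases hx p hp with h1 | ⟨h1, _⟩ <;> omega
    have hlt := dropWhile_fst_lt x rest hrest hle
    rw [ddf]
    refine List.pairwise_cons.mpr ⟨?_, ih (hrest.sublist (List.dropWhile_sublist _))⟩
    intro v hv
    obtain ⟨p, hp, rfl⟩ := ddf_fst_mem_of _ v hv
    exact hlt p hp

lemma ddf_len (rs : List (Int × Int)) : (ddf rs).2.length = (ddf rs).1.length := by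
  induction rs using ddf.induct with
  | case1 => simp [ddf]
  | case2 x i rest ih => rw [ddf]; simpa using ih

lemma ddf_zip (rs : List (Int × Int)) (hpw : rs.Pairwise pvGe) :
    ∀ q ∈ (ddf rs).1.zip (ddf rs).2, q ∈ rs ∧ ∀ p ∈ rs, p.1 = q.1 → p.2 ≤ q.2 := by
  induction rs using ddf.induct with
  | case1 => simp [ddf]
  | case2 x i rest ih =>
    rcases List.pairwise_cons.mp hpw with ⟨hx, hrest⟩
    have hle : ∀ p ∈ rest, p.1 ≤ x := by
      intro p hp; rcases hx p hp with h1 | ⟨h1, _⟩ <;> omega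
    have hlt := dropWhile_fst_lt x rest hrest hle
    intro q hq
    rw [ddf] at hq
    simp only [List.zip_cons_cons] at hq
    rcases List.mem_cons.mp hq with rfl | hq
    · refine ⟨List.mem_cons_self .., ?_⟩
      intro p hp hpx
      rcases List.mem_cons.mp hp with rfl | hp
      · simp
      · rcases hx p hp with h1 | ⟨h1, h2⟩ <;> simp_all
    · obtain ⟨hmem, hmax⟩ := ih (hrest.sublist (List.dropWhile_sublist _)) q hq
      have hsub : (rest.dropWhile (fun p => decide (p.1 = x))).Sublist rest :=
        List.dropWhile_sublist _
      refine ⟨List.mem_cons_of_mem _ (hsub.subset hmem), ?_⟩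
      have hqx : q.1 < x := hlt q hmem
      intro p hp hpq
      rcases List.mem_cons.mp hp with rfl | hp
      · omega
      · by_cases hpx : p.1 = x
        · omega
        · have : p ∈ rest.dropWhile (fun p => decide (p.1 = x)) := by
            have hsplit := List.takeWhile_append_dropWhile
              (p := fun p : Int × Int => decide (p.1 = x)) (l := rest)
            rw [← hsplit] at hp
            rcases List.mem_append.mp hp with h | h
            · exact absurd (by simpa using List.mem_takeWhile_imp h) hpx
            · exact h
          exact hmax p this hpq

-- ===== B-side lemmas =====

-- index of the LAST occurrence of v in lst, positions counted from s
def lastPos : List Int → Int → Int → Option Int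
  | [], _, _ => none
  | x :: xs, v, s =>
    match lastPos xs v (s + 1) with
    | some j => some j
    | none => if x = v then some s else none

lemma lastPos_none_iff (lst : List Int) (v s : Int) :
    lastPos lst v s = none ↔ v ∉ lst := by
  induction lst generalizing s with
  | nil => simp [lastPos]
  | cons x xs ih =>
    rw [lastPos]
    cases h : lastPos xs v (s + 1) with
    | some j =>
      simp only []
      constructor
      · intro h'; cases h'
      · intro h'
        exact absurd ((ih (s + 1)).mpr (fun hm => h' (List.mem_cons_of_mem _ hm)))
          (by simp [h])
    | none =>
      have hv : v ∉ xs := (ih (s + 1)).mp h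
      by_cases hxv : x = v
      · simp [hxv, hv]
      · simp only [if_neg hxv]
        simp only [List.mem_cons, not_or]
        constructor
        · intro _; exact ⟨fun hvx => hxv hvx.symm, hv⟩
        · intro _; trivial

lemma lastPos_some_spec (lst : List Int) (v s j : Int)
    (h : lastPos lst v s = some j) :
    (j, v) ∈ PySem.List.enumerate lst s ∧
      ∀ q ∈ PySem.List.enumerate lst s, q.2 = v → q.1 ≤ j := by
  induction lst generalizing s with
  | nil => simp [lastPos] at h
  | cons x xs ih =>
    rw [lastPos] at h
    rw [PySem.List.enumerate_cons]
    cases h' : lastPos xs v (s + 1) with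
    | some j' =>
      rw [h'] at h
      injection h with hj
      subst hj
      obtain ⟨hmem, hmax⟩ := ih (s + 1) h'
      refine ⟨List.mem_cons_of_mem _ hmem, ?_⟩
      intro q hq hqv
      rcases List.mem_cons.mp hq with rfl | hq
      · -- q = (s, x); j' is an index of enumerate xs (s+1), so s < j'
        have : s + 1 ≤ j' := by
          have hmem' : (j', v) ∈ PySem.List.enumerate xs (s + 1) := hmem
          have hfst : j' ∈ (PySem.List.enumerate xs (s + 1)).map (fun q => q.1) :=
            List.mem_map.mpr ⟨(j', v), hmem', rfl⟩
          rw [PySem.List.map_fst_enumerate] at hfst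
          exact (PySem.List.mem_pyRange_one.mp hfst).1
        simpa using by omega
      · exact hmax q hq hqv
    | none =>
      rw [h'] at h
      have hv : v ∉ xs := (lastPos_none_iff xs v (s + 1)).mp h'
      by_cases hxv : x = v
      · rw [if_pos hxv] at h
        injection h with hj
        subst hj
        subst hxv
        refine ⟨List.mem_cons_self .., ?_⟩
        intro q hq hqv
        rcases List.mem_cons.mp hq with rfl | hq
        · simp
        · exfalso
          apply hv
          have : q.2 ∈ (PySem.List.enumerate xs (s + 1)).map (fun q => q.2) :=
            List.mem_map.mpr ⟨q, hq, rfl⟩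
          rw [PySem.List.map_snd_enumerate] at this
          rwa [hqv] at this
      · rw [if_neg hxv] at h; cases h

-- the dict built by B answers get? with the last position
lemma build_get? (lst : List Int) (d0 : PySem.Dict Int Int) (s v : Int) :
    ((PySem.List.enumerate lst s).foldl (fun d p => d.insert p.2 p.1) d0).get? v
      = (lastPos lst v s).or (d0.get? v) := by
  induction lst generalizing s d0 with
  | nil => simp [lastPos, PySem.List.enumerate_nil]
  | cons x xs ih =>
    rw [PySem.List.enumerate_cons, List.foldl_cons, ih, lastPos]
    cases h : lastPos xs v (s + 1) with
    | some j => simp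
    | none =>
      by_cases hxv : x = v
      · subst hxv
        simp [PySem.Dict.get?_insert_self]
      · simp [PySem.Dict.get?_insert_of_ne _ _ (fun h => hxv h.symm), hxv]

lemma keys_insert (d : PySem.Dict Int Int) (k : Int) (v : Int) :
    (d.insert k v).keys = if d.contains k then d.keys else d.keys ++ [k] := by
  by_cases h : d.contains k
  · simp only [PySem.Dict.insert, if_pos h, PySem.Dict.keys, List.map_map]
    apply List.map_congr_left
    intro p _
    by_cases hp : p.1 == k
    · have hpk : p.1 = k := beq_iff_eq.mp hp
      simp [Function.comp, hpk]
    · simp [Function.comp, hp]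
  · simp [PySem.Dict.insert, h, PySem.Dict.keys]

lemma contains_iff_mem_keys (d : PySem.Dict Int Int) (k : Int) :
    d.contains k = true ↔ k ∈ d.keys := by
  simp [PySem.Dict.contains, PySem.Dict.keys, List.any_eq_true]

lemma build_keys_nodup (lst : List Int) (d0 : PySem.Dict Int Int) (s : Int)
    (h : d0.keys.Nodup) :
    ((PySem.List.enumerate lst s).foldl (fun d p => d.insert p.2 p.1) d0).keys.Nodup := by
  induction lst generalizing s d0 with
  | nil => simpa [PySem.List.enumerate_nil]
  | cons x xs ih =>
    rw [PySem.List.enumerate_cons, List.foldl_cons]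
    apply ih
    rw [keys_insert]
    by_cases hc : d0.contains x
    · simpa [hc]
    · rw [if_neg (by simp [hc])]
      refine List.Nodup.append h (by simp) ?_
      intro a ha hb
      simp only [List.mem_singleton] at hb
      subst hb
      exact hc ((contains_iff_mem_keys d0 a).mpr ha)

lemma mem_keys_iff_get?_isSome (d : PySem.Dict Int Int) (k : Int) :
    k ∈ d.keys ↔ (d.get? k).isSome := by
  rw [← contains_iff_mem_keys]
  simp [PySem.Dict.contains, PySem.Dict.get?, List.any_eq_true, List.find?_isSome]

lemma build_keys_mem (lst : List Int) (v : Int) :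
    v ∈ ((PySem.List.enumerate lst).foldl (fun d p => d.insert p.2 p.1)
          (PySem.Dict.empty : PySem.Dict Int Int)).keys ↔ v ∈ lst := by
  rw [mem_keys_iff_get?_isSome, build_get?]
  rcases h : lastPos lst v 0 with _ | j
  · simp [PySem.Dict.get?_empty, (lastPos_none_iff lst v 0).mp h]
  · have hv : v ∈ lst := by
      by_contra hv
      rw [(lastPos_none_iff lst v 0).mpr hv] at h
      cases h
    simp [hv]

-- membership in lst ↔ membership among swapped enumerate pairs' first components
lemma mem_lst_iff_P (lst : List Int) (v : Int) :
    v ∈ lst ↔ ∃ p ∈ (PySem.List.enumerate lst).map (fun p => (p.2, p.1)), p.1 = v := by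
  constructor
  · intro hv
    have : v ∈ (PySem.List.enumerate lst 0).map (fun q => q.2) := by
      rw [PySem.List.map_snd_enumerate]; exact hv
    obtain ⟨q, hq, rfl⟩ := List.mem_map.mp this
    exact ⟨(q.2, q.1), List.mem_map.mpr ⟨q, hq, rfl⟩, rfl⟩
  · rintro ⟨p, hp, rfl⟩
    obtain ⟨q, hq, rfl⟩ := List.mem_map.mp hp
    have : q.2 ∈ (PySem.List.enumerate lst 0).map (fun q => q.2) :=
      List.mem_map.mpr ⟨q, hq, rfl⟩
    rwa [PySem.List.map_snd_enumerate] at this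

-- ===== main proof =====

theorem sort_descending_order_eq (lst : List Int) :
    sort_descending_order lst = sort_descending_order_alt lst := by
  unfold sort_descending_order sort_descending_order_alt
  set P := (PySem.List.enumerate lst).map (fun p => (p.2, p.1)) with hP
  set R := PySem.List.sorted2 P (fun p => p.1) (fun p => p.2) true with hR
  set d := (PySem.List.enumerate lst).foldl (fun d p => d.insert p.2 p.1)
      (PySem.Dict.empty : PySem.Dict Int Int) with hd
  have hpwR : R.Pairwise pvGe := ranks_pairwise P
  have hpermRP : R.Perm P := PySem.List.sorted2_perm P _ _ _
  -- A's fold computes ddf R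
  have hA : R.foldl
      (fun (acc : List Int × List Int) p =>
        if p.1 ∈ acc.1 then acc else (acc.1 ++ [p.1], acc.2 ++ [p.2])) ([], [])
      = ((ddf R).1, (ddf R).2) := by
    have := foldl_eq_ddf R.length R le_rfl hpwR [] [] (by simp)
    simpa using this
  rw [hA]
  -- membership of values
  have hmemR : ∀ v, v ∈ (ddf R).1 ↔ v ∈ lst := by
    intro v
    constructor
    · intro hv
      obtain ⟨p, hp, rfl⟩ := ddf_fst_mem_of R v hv
      exact (mem_lst_iff_P lst p.1).mpr ⟨p, hpermRP.subset hp, rfl⟩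
    · intro hv
      obtain ⟨p, hp, rfl⟩ := (mem_lst_iff_P lst v).mp hv
      exact ddf_fst_mem R hpwR p (hpermRP.symm.subset hp)
  have hpwV : (ddf R).1.Pairwise (fun a b => b < a) := ddf_fst_pairwise R hpwR
  have hndV : (ddf R).1.Nodup := hpwV.imp (fun h => by omega) |>.nodup
  have hndK : d.keys.Nodup := build_keys_nodup lst PySem.Dict.empty 0 (by simp [PySem.Dict.keys, PySem.Dict.empty])
  have hperm : (ddf R).1.Perm d.keys := by
    rw [List.perm_ext_iff_of_nodup hndV hndK]
    intro v
    rw [hmemR v, hd, build_keys_mem]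
  have hvals : PySem.List.sorted d.keys (fun x => x) true = (ddf R).1 :=
    PySem.List.sorted_rev_eq_of_perm_of_pairwise_gt d.keys (ddf R).1 (fun x => x)
      hperm hpwV
  show ((ddf R).1, (ddf R).2)
      = (PySem.List.sorted d.keys (fun x => x) true,
         (PySem.List.sorted d.keys (fun x => x) true).map (fun v => d.getD v 0))
  rw [hvals]
  -- positions
  have hl2 : (ddf R).2.length = (ddf R).1.length := ddf_len R
  have hpos : (ddf R).1.map (fun v => d.getD v 0) = (ddf R).2 := by
    apply List.ext_getElem (by simp [hl2])
    intro k hk1 hk2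
    have hkv : k < (ddf R).1.length := by simpa using hk1
    have hkz : k < ((ddf R).1.zip (ddf R).2).length := by
      rw [List.length_zip]; omega
    have hzq : (((ddf R).1[k]'hkv, (ddf R).2[k]'hk2) : Int × Int)
        ∈ (ddf R).1.zip (ddf R).2 := by
      have hmm := List.getElem_mem hkz
      rwa [List.getElem_zip] at hmm
    obtain ⟨hmem, hmax⟩ := ddf_zip R hpwR _ hzq
    -- translate to enumerate facts
    have hmemE : (((ddf R).2[k]'hk2, (ddf R).1[k]'hkv) : Int × Int)
        ∈ PySem.List.enumerate lst 0 := by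
      have hP : (((ddf R).1[k]'hkv, (ddf R).2[k]'hk2) : Int × Int) ∈ P := hpermRP.subset hmem
      obtain ⟨q, hq, heq⟩ := List.mem_map.mp hP
      have h1 : q.2 = (ddf R).1[k]'hkv := congrArg Prod.fst heq
      have h2 : q.1 = (ddf R).2[k]'hk2 := congrArg Prod.snd heq
      rw [← h1, ← h2]
      exact hq
    have hmaxE : ∀ q ∈ PySem.List.enumerate lst 0, q.2 = (ddf R).1[k]'hkv →
        q.1 ≤ (ddf R).2[k]'hk2 := by
      intro q hq hqv
      have hPq : ((q.2, q.1) : Int × Int) ∈ P := List.mem_map.mpr ⟨q, hq, rfl⟩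
      have := hmax (q.2, q.1) (hpermRP.symm.subset hPq) (by simpa using hqv)
      simpa using this
    have hlp : lastPos lst ((ddf R).1[k]'hkv) 0 = some ((ddf R).2[k]'hk2) := by
      rcases h : lastPos lst ((ddf R).1[k]'hkv) 0 with _ | j
      · exfalso
        have hvmem : (ddf R).1[k]'hkv ∈ lst := (hmemR _).mp (List.getElem_mem hkv)
        exact (lastPos_none_iff lst _ 0).mp h hvmem
      · obtain ⟨hjm, hjmax⟩ := lastPos_some_spec lst _ 0 j h
        have h1 : j ≤ (ddf R).2[k]'hk2 := hmaxE (j, (ddf R).1[k]'hkv) hjm rfl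
        have h2 : (ddf R).2[k]'hk2 ≤ j := hjmax _ hmemE rfl
        have : j = (ddf R).2[k]'hk2 := le_antisymm h1 h2
        rw [this]
    rw [List.getElem_map]
    show d.getD ((ddf R).1[k]'hkv) 0 = (ddf R).2[k]'hk2
    rw [PySem.Dict.getD, hd, build_get?, hlp]
    rfl
  rw [hpos]

-- ===== VERDICT (by name: the statement is the Claim_ definition above) =====
theorem sort_descending_order_spec : Claim_equal_sort_descending_order := by
  intro lst _
  unfold Spec_sort_descending_order
  exact sort_descending_order_eq lst
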